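-- pv_equiv track=rewrite | github.com/More4me/AI | Sudoko/Game.py | tableeliminate
-- ===== SOURCE A (Python) =====
-- from copy import deepcopy
--
-- def tableeliminate(arr,listss,row,col):
--     board=deepcopy(listss)
--     begi=int(row/3)
--     begi=begi*3
--     begj=int(col/3)
--     begj=begj*3
--     endi=begi+3
--     endj=begj+3
--     while begi < endi:
--         j=begj
--         while j < endj:
--             if  board.__contains__(arr[begi][j]):
--                 board.pop(board.index(arr[begi][j]))
--             j=j+1
--         begi=begi+1
--
--     return board
-- ===== SOURCE B (Python) =====
-- from copy import deepcopy
--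
-- def tableeliminate(arr, listss, row, col):
--     begi = int(row / 3) * 3
--     begj = int(col / 3) * 3
--     cnt = {}
--     for i in range(begi, begi + 3):
--         for j in range(begj, begj + 3):
--             v = arr[i][j]
--             cnt[v] = cnt.get(v, 0) + 1
--     out = []
--     for x in deepcopy(listss):
--         c = cnt.get(x, 0)
--         if c > 0:
--             cnt[x] = c - 1
--         else:
--             out.append(x)
--     return out
-- ===== Notes on version B (the rewrite author's own statement) =====
-- stated objective: alternative
-- what changed: Replaces A's nine repeated contains/index/pop scans of the candidate list with a dict counting the block values once, followed by a single pass over the candidates that drops each element while its remaining block count is positive.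
import Mathlib
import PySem

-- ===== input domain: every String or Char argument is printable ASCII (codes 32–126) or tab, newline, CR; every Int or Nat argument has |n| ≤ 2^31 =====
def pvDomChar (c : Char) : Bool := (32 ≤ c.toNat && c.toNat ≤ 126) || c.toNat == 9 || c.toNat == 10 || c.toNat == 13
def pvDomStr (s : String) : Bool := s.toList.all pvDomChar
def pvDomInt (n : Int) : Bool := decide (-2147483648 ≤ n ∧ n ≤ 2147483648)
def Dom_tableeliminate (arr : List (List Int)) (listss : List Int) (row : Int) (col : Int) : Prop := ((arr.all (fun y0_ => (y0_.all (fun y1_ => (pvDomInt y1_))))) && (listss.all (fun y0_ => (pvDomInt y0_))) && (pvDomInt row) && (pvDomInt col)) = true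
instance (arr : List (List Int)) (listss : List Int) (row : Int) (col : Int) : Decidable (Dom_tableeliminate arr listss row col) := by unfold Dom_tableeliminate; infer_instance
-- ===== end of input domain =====

-- B replaces A's nine contains/index/pop scans of the candidate list by one dict of block
-- counts plus a single counter-consuming pass over the candidates (objective: alternative).

-- ===== PORT A =====
-- literal port of A: board = copy of listss; for each of the nine block cells, if the value
-- is in board, pop it at board.index(value).  int(row/3) is PySem.Int.truncdiv row 3.
def tableeliminate (arr : List (List Int)) (listss : List Int) (row : Int) (col : Int) : List Int :=
  let board := listss
  let begi := PySem.Int.truncdiv row 3 * 3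
  let begj := PySem.Int.truncdiv col 3 * 3
  let endi := begi + 3
  let endj := begj + 3
  (PySem.List.pyRange begi endi 1).foldl (fun b i =>
    (PySem.List.pyRange begj endj 1).foldl (fun b2 j =>
      -- arr[begi][j]; in range under Pre_, default values otherwise
      let v := PySem.List.pyGetD (PySem.List.pyGetD arr i []) j 0
      if b2.contains v then
        match PySem.List.index? b2 v with
        | some k =>
          match PySem.List.pop? b2 (k : Int) with
          | some r => r.2
          | none => b2
        | none => b2
      else b2) b) board

-- ===== PORT B =====
-- the single counter-consuming pass of Source B over the candidate list
def pvPassB (cnt : PySem.Dict Int Int) : List Int → List Int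
  | [] => []
  | x :: xs =>
    let c := cnt.getD x 0
    if 0 < c then pvPassB (cnt.insert x (c - 1)) xs
    else x :: pvPassB cnt xs

def tableeliminate_alt (arr : List (List Int)) (listss : List Int) (row : Int) (col : Int) : List Int :=
  let begi := PySem.Int.truncdiv row 3 * 3
  let begj := PySem.Int.truncdiv col 3 * 3
  let cnt := (PySem.List.pyRange begi (begi + 3) 1).foldl (fun c i =>
    (PySem.List.pyRange begj (begj + 3) 1).foldl (fun c2 j =>
      let v := PySem.List.pyGetD (PySem.List.pyGetD arr i []) j 0
      c2.insert v (c2.getD v 0 + 1)) c) PySem.Dict.empty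
  pvPassB cnt listss

-- ===== PRECONDITION & SPEC =====
-- Pre_: the nine accesses arr[i][j] over the 3x3 block are in range (Python indexing,
-- negative wraparound included) — exactly where A returns instead of raising IndexError.
def Pre_tableeliminate (arr : List (List Int)) (listss : List Int) (row : Int) (col : Int) : Prop :=
  let begi := PySem.Int.truncdiv row 3 * 3
  let begj := PySem.Int.truncdiv col 3 * 3
  ∀ i ∈ PySem.List.pyRange begi (begi + 3) 1,
    PySem.Raise.InRange arr.length i ∧
    ∀ j ∈ PySem.List.pyRange begj (begj + 3) 1,
      PySem.Raise.InRange (PySem.List.pyGetD arr i []).length j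
instance (arr : List (List Int)) (listss : List Int) (row : Int) (col : Int) : Decidable (Pre_tableeliminate arr listss row col) := by unfold Pre_tableeliminate; infer_instance

def pvWitness_tableeliminate : List (List Int) × List Int × Int × Int :=
  ([[1, 2, 3], [4, 5, 6], [7, 8, 9]], [1, 5, 9, 5, 10], 0, 0)

def Spec_tableeliminate (arr : List (List Int)) (listss : List Int) (row : Int) (col : Int) (out : List Int) : Prop := out = tableeliminate_alt arr listss row col
instance (arr : List (List Int)) (listss : List Int) (row : Int) (col : Int) (out : List Int) : Decidable (Spec_tableeliminate arr listss row col out) := by unfold Spec_tableeliminate; infer_instance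

-- ===== CLAIM (what is proved, stated in full; the proofs are below) =====
def Claim_equal_tableeliminate : Prop := ∀ (arr : List (List Int)) (listss : List Int) (row : Int) (col : Int), Dom_tableeliminate arr listss row col → Pre_tableeliminate arr listss row col → Spec_tableeliminate arr listss row col (tableeliminate arr listss row col)

-- ===== LEMMAS AND PROOFS =====

-- functional model of the counter-consuming pass
def pvPassF : (Int → Int) → List Int → List Int
  | _, [] => []
  | f, x :: xs =>
    if 0 < f x then pvPassF (fun y => if y = x then f x - 1 else f y) xs
    else x :: pvPassF f xs

theorem pvPassF_congr (f g : Int → Int) (l : List Int) (h : ∀ x, f x = g x) :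
    pvPassF f l = pvPassF g l := by
  induction l generalizing f g with
  | nil => rfl
  | cons x xs ih =>
    simp only [pvPassF, h x]
    split_ifs with hx
    · exact ih _ _ (fun y => by by_cases hy : y = x <;> simp [hy, h])
    · rw [ih _ _ h]

theorem pvPassB_eq_pvPassF (cnt : PySem.Dict Int Int) (l : List Int) :
    pvPassB cnt l = pvPassF (fun y => cnt.getD y 0) l := by
  induction l generalizing cnt with
  | nil => rfl
  | cons x xs ih =>
    simp only [pvPassB, pvPassF]
    split_ifs with hx
    · rw [ih]
      exact pvPassF_congr _ _ _ (fun y => by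
        rw [PySem.Dict.getD_insert])
    · rw [ih]

theorem pvPassF_zero (f : Int → Int) (l : List Int) (h : ∀ x, f x = 0) :
    pvPassF f l = l := by
  induction l generalizing f with
  | nil => rfl
  | cons x xs ih => simp [pvPassF, h x, ih _ h]

theorem pvPassF_inc (l : List Int) (f : Int → Int) (v : Int) (hf : ∀ x, 0 ≤ f x) :
    pvPassF (fun x => f x + if x = v then 1 else 0) l = pvPassF f (l.erase v) := by
  induction l generalizing f with
  | nil => rfl
  | cons x xs ih =>
    by_cases hxv : x = v
    · subst hxv
      have hpos : (0 : Int) < f x + 1 := by have := hf x; omega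
      simp only [pvPassF, hpos, if_true, List.erase_cons_head]
      exact pvPassF_congr _ _ _ (fun y => by by_cases hy : y = x <;> simp [hy])
    · rw [List.erase_cons_tail (by simpa using hxv)]
      simp only [pvPassF, if_neg hxv, add_zero]
      split_ifs with hx
      · rw [pvPassF_congr _ (fun y => (if y = x then f x - 1 else f y) + if y = v then 1 else 0) _
          (fun y => by by_cases hy : y = x <;> simp [hy, hxv])]
        exact ih _ (fun y => by by_cases hy : y = x <;> simp only [hy, if_true, if_false] <;> [omega; exact hf y])
      · rw [ih f hf]

theorem pvPassF_count_eq_foldl_erase (vs l : List Int) :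
    pvPassF (fun x => (vs.count x : Int)) l = vs.foldl (fun b v => b.erase v) l := by
  induction vs generalizing l with
  | nil => exact pvPassF_zero _ _ (fun x => by simp)
  | cons v vs ih =>
    rw [List.foldl_cons, ← ih (l.erase v), ← pvPassF_inc l _ v (fun x => by positivity)]
    exact pvPassF_congr _ _ _ (fun x => by
      rcases eq_or_ne x v with hx | hx
      · simp [hx]
      · simp [List.count_cons, hx, Ne.symm hx])

theorem pvEraseIdxAppend (pre suf : List Int) (v : Int) :
    (pre ++ v :: suf).eraseIdx pre.length = pre ++ suf := by
  induction pre with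
  | nil => simp
  | cons a t ih => simpa using ih

-- A's per-cell step is List.erase
theorem pvStepA_eq_erase (b : List Int) (v : Int) :
    (if b.contains v then
        match PySem.List.index? b v with
        | some k =>
          match PySem.List.pop? b (k : Int) with
          | some r => r.2
          | none => b
        | none => b
      else b) = b.erase v := by
  by_cases hv : v ∈ b
  · obtain ⟨k, hk⟩ := Option.isSome_iff_exists.mp ((PySem.List.index?_isSome_iff b v).mpr hv)
    obtain ⟨pre, suf, hb, hlen, hvpre⟩ := (PySem.List.index?_eq_some_iff _ _ _).mp hk
    have hklt : k < b.length := by subst hb; simp; omega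
    rw [if_pos (by simpa using hv), hk]
    show (match PySem.List.pop? b (k : Int) with | some r => r.2 | none => b) = b.erase v
    rw [PySem.List.pop?_natCast b k hklt]
    show b.eraseIdx k = b.erase v
    subst hb hlen
    rw [List.erase_append_right _ (by simpa using hvpre), List.erase_cons_head,
      pvEraseIdxAppend]
  · rw [if_neg (by simpa using hv), List.erase_of_not_mem hv]

-- nested fold over two ranges is a fold over the flattened cell list
theorem pvFoldlFoldl {α β γ : Type} (L : List α) (M : α → List β) (g : γ → β → γ) (init : γ) :
    L.foldl (fun acc i => (M i).foldl g acc) init = (L.flatMap M).foldl g init := by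
  induction L generalizing init with
  | nil => rfl
  | cons x xs ih => simp [List.foldl_append, ih]

-- abbreviations for the proof: A's per-cell step, the cell value, the flattened block cells
def pvStep (b : List Int) (v : Int) : List Int :=
  if b.contains v then
    match PySem.List.index? b v with
    | some k =>
      match PySem.List.pop? b (k : Int) with
      | some r => r.2
      | none => b
    | none => b
  else b

def pvVal (arr : List (List Int)) (i j : Int) : Int :=
  PySem.List.pyGetD (PySem.List.pyGetD arr i []) j 0

def pvCells (arr : List (List Int)) (bi bj : Int) : List Int :=
  (PySem.List.pyRange bi (bi + 3) 1).flatMap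
    (fun i => (PySem.List.pyRange bj (bj + 3) 1).map (pvVal arr i))

theorem pvA_flatten (arr : List (List Int)) (l : List Int) (bi bj : Int) :
    (PySem.List.pyRange bi (bi + 3) 1).foldl (fun b i =>
      (PySem.List.pyRange bj (bj + 3) 1).foldl (fun b2 j => pvStep b2 (pvVal arr i j)) b) l
    = (pvCells arr bi bj).foldl pvStep l := by
  rw [pvCells, ← pvFoldlFoldl]
  exact PySem.List.foldl_congr_mem _ _ _ _ (fun acc x _ => List.foldl_map.symm)

theorem pvB_counter (arr : List (List Int)) (bi bj : Int) :
    (PySem.List.pyRange bi (bi + 3) 1).foldl (fun c i =>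
      (PySem.List.pyRange bj (bj + 3) 1).foldl (fun c2 j =>
        c2.insert (pvVal arr i j) (c2.getD (pvVal arr i j) 0 + 1)) c) PySem.Dict.empty
    = PySem.Dict.counter (pvCells arr bi bj) := by
  rw [← PySem.Dict.foldl_insert_getD_add_one_eq_counter, pvCells, ← pvFoldlFoldl]
  exact PySem.List.foldl_congr_mem _ _ _ _ (fun acc x _ =>
    (List.foldl_map (f := pvVal arr x)
      (g := fun (d : PySem.Dict Int Int) v => d.insert v (d.getD v 0 + 1))).symm)

theorem pvMain (arr : List (List Int)) (l : List Int) (bi bj : Int) :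
    (PySem.List.pyRange bi (bi + 3) 1).foldl (fun b i =>
      (PySem.List.pyRange bj (bj + 3) 1).foldl (fun b2 j => pvStep b2 (pvVal arr i j)) b) l
    = pvPassB ((PySem.List.pyRange bi (bi + 3) 1).foldl (fun c i =>
        (PySem.List.pyRange bj (bj + 3) 1).foldl (fun c2 j =>
          c2.insert (pvVal arr i j) (c2.getD (pvVal arr i j) 0 + 1)) c) PySem.Dict.empty) l := by
  rw [pvA_flatten, pvB_counter, pvPassB_eq_pvPassF]
  calc (pvCells arr bi bj).foldl pvStep l
      = (pvCells arr bi bj).foldl (fun b v => b.erase v) l :=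
        PySem.List.foldl_congr_mem _ _ _ _ (fun acc x _ => pvStepA_eq_erase acc x)
    _ = pvPassF (fun x => ((pvCells arr bi bj).count x : Int)) l :=
        (pvPassF_count_eq_foldl_erase _ _).symm
    _ = pvPassF (fun y => (PySem.Dict.counter (pvCells arr bi bj)).getD y 0) l :=
        pvPassF_congr _ _ _ (fun y => by rw [PySem.Dict.getD_counter])

-- ===== VERDICT (by name: the statement is the Claim_ definition above) =====
theorem tableeliminate_spec : Claim_equal_tableeliminate := by
  intro arr listss row col _ _
  show tableeliminate arr listss row col = tableeliminate_alt arr listss row col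
  show (PySem.List.pyRange (PySem.Int.truncdiv row 3 * 3) (PySem.Int.truncdiv row 3 * 3 + 3) 1).foldl
      (fun b i => (PySem.List.pyRange (PySem.Int.truncdiv col 3 * 3) (PySem.Int.truncdiv col 3 * 3 + 3) 1).foldl
        (fun b2 j => pvStep b2 (pvVal arr i j)) b) listss
    = pvPassB ((PySem.List.pyRange (PySem.Int.truncdiv row 3 * 3) (PySem.Int.truncdiv row 3 * 3 + 3) 1).foldl
        (fun c i => (PySem.List.pyRange (PySem.Int.truncdiv col 3 * 3) (PySem.Int.truncdiv col 3 * 3 + 3) 1).foldl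
          (fun c2 j => c2.insert (pvVal arr i j) (c2.getD (pvVal arr i j) 0 + 1)) c) PySem.Dict.empty) listss
  exact pvMain arr listss _ _
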